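-- pv_equiv track=rewrite | github.com/ayoubzulfiqar/Leetcode-Medium | WateringPlantsII/watering_plants_ii.py | wateringPlants
-- ===== SOURCE A (Python) =====
-- def wateringPlants(plants: list[int], capacityA: int, capacityB: int) -> int:
--     n = len(plants)
--     refills = 0
--     alice_current_water = capacityA
--     bob_current_water = capacityB
--
--     left = 0
--     right = n - 1
--
--     while left <= right:
--         if left == right:
--             # Alice and Bob meet at the same plant
--             # The one with more water waters it. If equal, Alice waters.
--             if alice_current_water >= bob_current_water:
--                 if alice_current_water < plants[left]:
--                     refills += 1
--                     alice_current_water = capacityA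
--                 alice_current_water -= plants[left]
--             else: # Bob has more water
--                 if bob_current_water < plants[right]:
--                     refills += 1
--                     bob_current_water = capacityB
--                 bob_current_water -= plants[right]
--             break # All plants watered, exit loop
--         else:
--             # Alice waters plant at `left`
--             if alice_current_water < plants[left]:
--                 refills += 1
--                 alice_current_water = capacityA
--             alice_current_water -= plants[left]
--             left += 1
--
--             # Bob waters plant at `right`
--             if bob_current_water < plants[right]:
--                 refills += 1
--                 bob_current_water = capacityB
--             bob_current_water -= plants[right]
--             right -= 1
--
--     return refills
-- ===== SOURCE B (Python) =====
-- def _run(seq, cap):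
--     water, refills = cap, 0
--     for p in seq:
--         if water < p:
--             refills += 1
--             water = cap
--         water -= p
--     return water, refills
--
--
-- def wateringPlants(plants, capacityA, capacityB):
--     n = len(plants)
--     mid = n // 2
--     aw, ar = _run(plants[:mid], capacityA)
--     bw, br = _run(plants[n - mid:][::-1], capacityB)
--     refills = ar + br
--     if n % 2 == 1:
--         p = plants[mid]
--         if aw >= bw:
--             if aw < p:
--                 refills += 1
--         else:
--             if bw < p:
--                 refills += 1
--     return refills
-- ===== Notes on version B (the rewrite author's own statement) =====
-- stated objective: alternative
-- what changed: Replaces A's single two-pointer while-loop over an interleaved 5-tuple state with two independent one-gardener folds (Alice over the first half, Bob over the reversed second half) plus a separate middle-plant comparison when the length is odd; the per-gardener folds avoid the interleaved-state bookkeeping.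
import Mathlib
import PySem

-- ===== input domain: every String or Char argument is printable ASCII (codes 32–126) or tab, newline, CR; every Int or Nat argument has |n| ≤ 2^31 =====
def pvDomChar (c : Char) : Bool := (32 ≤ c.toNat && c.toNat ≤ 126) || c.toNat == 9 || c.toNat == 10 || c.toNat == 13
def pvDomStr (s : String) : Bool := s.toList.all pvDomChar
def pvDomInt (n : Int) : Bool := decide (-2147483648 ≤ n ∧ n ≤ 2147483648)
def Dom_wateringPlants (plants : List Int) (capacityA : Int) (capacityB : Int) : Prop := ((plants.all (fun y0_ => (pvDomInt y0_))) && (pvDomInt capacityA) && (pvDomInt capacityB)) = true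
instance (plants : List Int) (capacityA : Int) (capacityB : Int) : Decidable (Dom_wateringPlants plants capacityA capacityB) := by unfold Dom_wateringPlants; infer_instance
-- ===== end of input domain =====

-- B replaces A's single interleaved two-pointer while-loop with two independent
-- one-gardener folds (Alice over the first half, Bob over the reversed second half)
-- plus a separate middle-plant comparison when the length is odd; same return value, same O(n) cost.

-- ===== PORT A =====
-- A indexes plants[left]/plants[right] only with 0 ≤ left ≤ right < len plants,
-- so the total form pyGetD (exact in range) is used.
def wpLoop (plants : List Int) (capacityA capacityB : Int) (left right : Int)
    (aw bw refills : Int) : Int :=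
  if _h : left ≤ right then
    if left = right then
      -- middle plant: water updates after this are dead code for the returned refill count
      if aw ≥ bw then
        (if aw < PySem.List.pyGetD plants left 0 then refills + 1 else refills)
      else
        (if bw < PySem.List.pyGetD plants right 0 then refills + 1 else refills)
    else
      let p := PySem.List.pyGetD plants left 0
      let r1 := if aw < p then refills + 1 else refills
      let aw' := (if aw < p then capacityA else aw) - p
      let q := PySem.List.pyGetD plants right 0
      let r2 := if bw < q then r1 + 1 else r1
      let bw' := (if bw < q then capacityB else bw) - q
      wpLoop plants capacityA capacityB (left + 1) (right - 1) aw' bw' r2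
  else refills
termination_by (right + 1 - left).toNat
decreasing_by omega

def wateringPlants (plants : List Int) (capacityA : Int) (capacityB : Int) : Int :=
  wpLoop plants capacityA capacityB 0 ((plants.length : Int) - 1) capacityA capacityB 0

-- ===== PORT B =====
def runG (cap : Int) (seq : List Int) : Int × Int :=
  seq.foldl (fun wr p =>
      let wr := if wr.1 < p then (cap, wr.2 + 1) else wr
      (wr.1 - p, wr.2))
    (cap, 0)

def wateringPlants_alt (plants : List Int) (capacityA : Int) (capacityB : Int) : Int :=
  let n : Int := plants.length
  let mid := PySem.Int.floordiv n 2
  let a := runG capacityA (PySem.List.slice plants none (some mid))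
  let b := runG capacityB
      ((PySem.List.slice? (PySem.List.slice plants (some (n - mid)) none) none none (-1)).getD [])
  let refills := a.2 + b.2
  if PySem.Int.mod n 2 = 1 then
    let p := PySem.List.pyGetD plants mid 0
    if a.1 ≥ b.1 then (if a.1 < p then refills + 1 else refills)
    else (if b.1 < p then refills + 1 else refills)
  else refills

-- ===== PRECONDITION & SPEC =====
def Spec_wateringPlants (plants : List Int) (capacityA : Int) (capacityB : Int) (out : Int) : Prop := out = wateringPlants_alt plants capacityA capacityB
instance (plants : List Int) (capacityA : Int) (capacityB : Int) (out : Int) : Decidable (Spec_wateringPlants plants capacityA capacityB out) := by unfold Spec_wateringPlants; infer_instance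

-- ===== CLAIM (what is proved, stated in full; the proofs are below) =====
def Claim_equal_wateringPlants : Prop := ∀ (plants : List Int) (capacityA : Int) (capacityB : Int), Dom_wateringPlants plants capacityA capacityB → Spec_wateringPlants plants capacityA capacityB (wateringPlants plants capacityA capacityB)

-- ===== LEMMAS AND PROOFS =====

-- one watering step of a single gardener: new water and refill cost
def stepW (cap w p : Int) : Int := (if w < p then cap else w) - p
def costW (w p : Int) : Int := if w < p then 1 else 0

def stepG (cap : Int) (wr : Int × Int) (p : Int) : Int × Int :=
  (stepW cap wr.1 p, wr.2 + costW wr.1 p)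

-- B's result on an arbitrary segment, with arbitrary incoming water levels
def aliceRun (capA aw : Int) (xs : List Int) : Int × Int :=
  (xs.take (xs.length / 2)).foldl (stepG capA) (aw, 0)
def bobRun (capB bw : Int) (xs : List Int) : Int × Int :=
  ((xs.drop (xs.length - xs.length / 2)).reverse).foldl (stepG capB) (bw, 0)
def segRes (capA capB aw bw : Int) (xs : List Int) : Int :=
  (aliceRun capA aw xs).2 + (bobRun capB bw xs).2 +
    (if xs.length % 2 = 1 then
      (if (aliceRun capA aw xs).1 ≥ (bobRun capB bw xs).1
       then costW (aliceRun capA aw xs).1 (xs.getD (xs.length / 2) 0)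
       else costW (bobRun capB bw xs).1 (xs.getD (xs.length / 2) 0))
    else 0)

lemma runG_eq_foldl (cap : Int) (seq : List Int) :
    runG cap seq = seq.foldl (stepG cap) (cap, 0) := by
  unfold runG
  congr 1
  funext wr p
  simp only [stepG, stepW, costW]
  split <;> simp

lemma foldl_stepG_shift (cap : Int) (xs : List Int) (w r : Int) :
    xs.foldl (stepG cap) (w, r)
      = ((xs.foldl (stepG cap) (w, 0)).1, r + (xs.foldl (stepG cap) (w, 0)).2) := by
  induction xs generalizing w r with
  | nil => simp
  | cons x xs ih =>
      simp only [List.foldl_cons, stepG]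
      rw [ih, ih (stepW cap w x) (0 + costW w x)]
      ring_nf

-- the segment x :: ys ++ [y] after one paired A-step reduces to the segment ys
lemma segRes_cons_concat (capA capB aw bw x y : Int) (ys : List Int) :
    segRes capA capB aw bw (x :: (ys ++ [y]))
      = costW aw x + costW bw y
        + segRes capA capB (stepW capA aw x) (stepW capB bw y) ys := by
  have hlen : (x :: (ys ++ [y])).length = ys.length + 2 := by simp
  set n := ys.length with hn
  have hA : aliceRun capA aw (x :: (ys ++ [y]))
      = ((aliceRun capA (stepW capA aw x) ys).1,
         costW aw x + (aliceRun capA (stepW capA aw x) ys).2) := by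
    unfold aliceRun
    rw [hlen]
    have hm : (n + 2) / 2 = n / 2 + 1 := by omega
    rw [hm]
    have htake : (x :: (ys ++ [y])).take (n / 2 + 1) = x :: ys.take (n / 2) := by
      simp [List.take_append_of_le_length (by omega : n / 2 ≤ ys.length)]
    rw [htake, List.foldl_cons]
    have h0 : stepG capA (aw, 0) x = (stepW capA aw x, 0 + costW aw x) := rfl
    rw [h0, foldl_stepG_shift]
    simp [← hn]
  have hB : bobRun capB bw (x :: (ys ++ [y]))
      = ((bobRun capB (stepW capB bw y) ys).1,
         costW bw y + (bobRun capB (stepW capB bw y) ys).2) := by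
    unfold bobRun
    rw [hlen]
    have hm : (n + 2) - (n + 2) / 2 = (n - n / 2) + 1 := by omega
    rw [hm]
    have hdrop : (x :: (ys ++ [y])).drop ((n - n / 2) + 1)
        = ys.drop (n - n / 2) ++ [y] := by
      simp [List.drop_append_of_le_length (by omega : n - n / 2 ≤ ys.length)]
    rw [hdrop]
    simp only [List.reverse_append, List.reverse_singleton, List.singleton_append,
      List.foldl_cons]
    have h0 : stepG capB (bw, 0) y = (stepW capB bw y, 0 + costW bw y) := rfl
    rw [h0, foldl_stepG_shift]
    simp [← hn]
  unfold segRes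
  rw [hA, hB, hlen]
  have hpar : (n + 2) % 2 = n % 2 := by omega
  rw [hpar]
  by_cases hodd : n % 2 = 1
  · have hmid : (x :: (ys ++ [y])).getD ((n + 2) / 2) 0 = ys.getD (n / 2) 0 := by
      have hm : (n + 2) / 2 = n / 2 + 1 := by omega
      simp [hm, List.getD, List.getElem?_append,
        show n / 2 < ys.length by omega]
    rw [hmid, if_pos hodd]
    dsimp only
    split <;> ring
  · rw [if_neg hodd, if_neg (show ¬ ys.length % 2 = 1 by omega)]
    ring

-- the list segment plants[a..b] decomposes as head ++ middle ++ last
lemma seg_decomp (plants : List Int) (a b : Nat) (hab : a < b) (hb : b < plants.length) :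
    (plants.drop a).take (b + 1 - a)
      = plants[a] :: (((plants.drop (a + 1)).take (b - 1 + 1 - (a + 1))) ++ [plants[b]]) := by
  have ha : a < plants.length := by omega
  rw [List.drop_eq_getElem_cons ha]
  have h1 : b + 1 - a = (b - a) + 1 := by omega
  rw [h1, List.take_succ_cons]
  congr 1
  have h4 : b - 1 + 1 - (a + 1) = b - a - 1 := by omega
  have h2 : b - a = (b - a - 1) + 1 := by omega
  rw [h4, h2, List.take_add_one]
  have h3 : (plants.drop (a + 1))[b - a - 1]? = some plants[b] := by
    rw [List.getElem?_drop]
    have h5 : a + 1 + (b - a - 1) = b := by omega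
    rw [h5, List.getElem?_eq_getElem hb]
  rw [h3]
  rfl

-- main invariant: the two-pointer loop on segment [l..r] computes segRes of that segment
lemma wpLoop_eq_segRes (plants : List Int) (capA capB : Int) :
    ∀ (k : Nat) (l r aw bw ref : Int), (r + 1 - l).toNat = k → 0 ≤ l → r < (plants.length : Int) →
      wpLoop plants capA capB l r aw bw ref
        = ref + segRes capA capB aw bw ((plants.drop l.toNat).take (r + 1 - l).toNat) := by
  intro k
  induction k using Nat.strong_induction_on with
  | _ k ih =>
    intro l r aw bw ref hk hl hr
    rw [wpLoop]
    by_cases hle : l ≤ r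
    · simp only [hle, dif_pos]
      have hlnat : l.toNat < plants.length := by omega
      by_cases heq : l = r
      · subst heq
        have hseg : ((plants.drop l.toNat).take (l + 1 - l).toNat) = [plants[l.toNat]] := by
          have : (l + 1 - l).toNat = 1 := by omega
          rw [this, List.drop_eq_getElem_cons hlnat, List.take_succ_cons, List.take_zero]
        rw [hseg]
        have hget : PySem.List.pyGetD plants l 0 = plants[l.toNat] := by
          rw [PySem.List.pyGetD_eq_getElem plants 0 hl (by omega)]
        simp [segRes, aliceRun, bobRun, costW, hget, List.getD]
        split_ifs <;> omega
      · simp only [if_neg heq]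
        have hlr : l < r := lt_of_le_of_ne hle heq
        have hseg := seg_decomp plants l.toNat r.toNat (by omega) (by omega)
        have hnat1 : (r + 1 - l).toNat = r.toNat + 1 - l.toNat := by omega
        rw [hnat1, hseg]
        rw [segRes_cons_concat]
        have hgl : PySem.List.pyGetD plants l 0 = plants[l.toNat] := by
          rw [PySem.List.pyGetD_eq_getElem plants 0 hl (by omega)]
        have hgr : PySem.List.pyGetD plants r 0 = plants[r.toNat] := by
          rw [PySem.List.pyGetD_eq_getElem plants 0 (by omega) (by omega)]
        rw [ih ((r - 1) + 1 - (l + 1)).toNat (by omega) (l + 1) (r - 1) _ _ _ rfl (by omega) (by omega)]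
        have hnat2 : ((r - 1) + 1 - (l + 1)).toNat = r.toNat - 1 + 1 - (l.toNat + 1) := by omega
        have hnat3 : (l + 1).toNat = l.toNat + 1 := by omega
        rw [hnat2, hnat3, hgl, hgr]
        simp only [stepW, costW]
        split <;> split <;> ring
    · simp only [hle, dif_neg, not_false_iff]
      have : (r + 1 - l).toNat = 0 := by omega
      rw [this]
      simp [segRes, aliceRun, bobRun]

lemma alt_eq_segRes (plants : List Int) (capA capB : Int) :
    wateringPlants_alt plants capA capB = segRes capA capB capA capB plants := by
  unfold wateringPlants_alt
  dsimp only
  rw [show PySem.Int.floordiv (plants.length : Int) 2 = ((plants.length / 2 : Nat) : Int) from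
        by exact_mod_cast PySem.Int.floordiv_natCast plants.length 2,
      show PySem.Int.mod (plants.length : Int) 2 = ((plants.length % 2 : Nat) : Int) from
        by exact_mod_cast PySem.Int.mod_natCast plants.length 2,
      show (plants.length : Int) - ((plants.length / 2 : Nat) : Int)
          = ((plants.length - plants.length / 2 : Nat) : Int) from
        by push_cast [Nat.cast_sub (Nat.div_le_self plants.length 2)]; ring,
      PySem.List.slice_to_natCast, PySem.List.slice_from_natCast,
      PySem.List.slice?_none_none_neg_one]
  simp only [Option.getD_some, runG_eq_foldl, segRes, aliceRun, bobRun]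
  by_cases hodd : plants.length % 2 = 1
  · rw [if_pos (show ((plants.length % 2 : Nat) : Int) = 1 by exact_mod_cast hodd),
      if_pos hodd, PySem.List.pyGetD_natCast]
    simp only [costW]
    split_ifs <;> ring
  · rw [if_neg (show ¬ ((plants.length % 2 : Nat) : Int) = 1 by
        intro h; exact hodd (by exact_mod_cast h)), if_neg hodd]
    ring

-- ===== VERDICT (by name: the statement is the Claim_ definition above) =====
theorem wateringPlants_spec : Claim_equal_wateringPlants := by
  intro plants capA capB _
  unfold Spec_wateringPlants wateringPlants
  rw [alt_eq_segRes]
  by_cases hnil : plants = []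
  · subst hnil
    rw [wpLoop]
    simp [segRes, aliceRun, bobRun]
  · have hlen : 0 < plants.length := List.length_pos_iff.mpr hnil
    rw [wpLoop_eq_segRes plants capA capB ((plants.length : Int) - 1 + 1 - 0).toNat 0
      ((plants.length : Int) - 1) capA capB 0 rfl (by omega) (by omega)]
    have h1 : ((plants.length : Int) - 1 + 1 - 0).toNat = plants.length := by omega
    rw [h1]
    simp
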